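-- pv_equiv track=rewrite | github.com/olisheldon/aoc25 | python/day6.py | part2
-- ===== SOURCE A (Python) =====
-- def accumulate(col: list[int], op: str) -> int:
--     col_tot = 1 if op == "*" else 0
--     for num in col:
--         if op == "*":
--             col_tot *= num
--         else:
--             col_tot += num
--     return col_tot
--
-- def part2(data: list[str]):
--     res = []
--     i = 0
--     col_wise = list(zip(*data))
--     op = col_wise[0][-1]
--     group = []
--     while i in range(len(col_wise)):
--         col = col_wise[i]
--         if all(x == " " for x in col):
--             res.append(accumulate(group, op))
--             group = []
--             i += 1
--             if i not in range(len(col_wise)):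
--                 break
--             op = col_wise[i][-1]
--             continue
--         *num, _ = col
--         num = int("".join(n for n in num if n))
--         group.append(num)
--         i += 1
--     res.append(accumulate(group, op))
--     return sum(res)
-- ===== SOURCE B (Python) =====
-- def part2(data: list[str]):
--     if not data or not all(data):
--         raise ValueError("expected a non-empty grid of non-empty rows")
--     cols = list(zip(*data))
--     segs = []
--     cur = []
--     for col in cols:
--         if all(ch == " " for ch in col):
--             segs.append(cur)
--             cur = []
--         else:
--             cur.append(col)
--     segs.append(cur)
--     total = 0
--     for seg in segs:
--         if seg:
--             op = seg[0][-1]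
--             nums = [int("".join(col[:-1])) for col in seg]
--             if op == "*":
--                 t = 1
--                 for n in nums:
--                     t *= n
--             else:
--                 t = sum(nums)
--             total += t
--     return total
-- ===== Notes on version B (the rewrite author's own statement) =====
-- stated objective: alternative
-- what changed: A's single while-loop that threads the current operator and peeks ahead past each blank column is replaced by a two-phase decomposition: split the transposed columns into blank-separated segments, then map-reduce each segment with the operator read from its own first column.
-- intended difference: When the last column is blank and directly follows a group whose operator is '*', A's final accumulate([], op) reuses that stale '*' and returns the total plus a spurious 1; B returns the plain total of the groups, the intended value since an empty trailing group should contribute nothing. — e.g. on part2(["1 ", "* "]): A returns 2, B returns 1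
-- outside the precondition, e.g. on part2([]): A raises IndexError, B raises ValueError
import Mathlib
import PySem

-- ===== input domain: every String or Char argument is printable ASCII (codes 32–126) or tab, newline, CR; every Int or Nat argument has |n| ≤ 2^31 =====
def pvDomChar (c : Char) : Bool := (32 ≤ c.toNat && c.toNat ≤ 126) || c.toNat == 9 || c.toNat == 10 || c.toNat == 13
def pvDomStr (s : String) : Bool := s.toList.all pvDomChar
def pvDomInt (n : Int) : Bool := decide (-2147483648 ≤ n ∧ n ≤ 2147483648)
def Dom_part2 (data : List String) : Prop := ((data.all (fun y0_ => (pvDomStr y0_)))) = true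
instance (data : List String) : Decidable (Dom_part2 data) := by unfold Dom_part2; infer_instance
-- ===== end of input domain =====

-- B re-decomposes A's op-threading while-loop into two phases (split columns into blank-separated
-- segments, then map-reduce each segment); on a trailing blank column right after a '*' group A's
-- stale operator adds a spurious +1, stated as the intended difference D_part2 below.

-- shared primitives: col[-1] (a '[-1]' tuple index, totalized outside Pre_) and
-- int("".join(n for n in col[:-1] if n)) — the 'if n' filter keeps every 1-char string
def lastCh (c : List Char) : Char := (PySem.List.pyGet? c (-1)).getD ' '
def parseNum (col : List Char) : Int :=
  (PySem.Int.ofChars? (col.dropLast.filter (fun _ => true))).getD 0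

-- zip(*data): n-ary zip, truncating at the shortest row (exact; fuel = length of the first row)
def pyZipAux : Nat → List (List Char) → List (List Char)
  | 0, _ => []
  | n + 1, ls =>
    if ls.any (·.isEmpty) then []
    else (ls.map (fun l => l.headD ' ')) :: pyZipAux n (ls.map List.tail)

def pyZip (ls : List (List Char)) : List (List Char) :=
  match ls with
  | [] => []
  | l :: rest => pyZipAux l.length (l :: rest)

-- ===== PORT A =====
def accumulateA (col : List Int) (op : Char) : Int :=
  col.foldl (fun t num => if op = '*' then t * num else t + num) (if op = '*' then 1 else 0)

-- the while-loop over i (structural recursion on the remaining columns); the break path inlines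
-- the final res.append(accumulate(group, op)) with group = [] and the stale op
def part2Go : List (List Char) → Char → List Int → List Int → Int
  | [], op, group, res => (res ++ [accumulateA group op]).foldl (· + ·) 0
  | col :: rest, op, group, res =>
    if col.all (· = ' ') then
      match rest with
      | [] => ((res ++ [accumulateA group op]) ++ [accumulateA [] op]).foldl (· + ·) 0
      | c2 :: rest' => part2Go (c2 :: rest') (lastCh c2) [] (res ++ [accumulateA group op])
    else
      part2Go rest op (group ++ [parseNum col]) res

def part2 (data : List String) : Int :=
  let cols := pyZip (data.map String.toList)
  part2Go cols (lastCh (cols.headD [])) [] []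

-- ===== PORT B =====
def part2_alt (data : List String) : Int :=
  if data.isEmpty || data.any (fun s => s.toList.isEmpty) then 0  -- B raises ValueError here (outside Pre_)
  else
  let cols := pyZip (data.map String.toList)
  let p := cols.foldl
    (fun (st : List (List (List Char)) × List (List Char)) col =>
      if col.all (· = ' ') then (st.1 ++ [st.2], []) else (st.1, st.2 ++ [col]))
    ([], [])
  let segs := p.1 ++ [p.2]
  segs.foldl
    (fun total seg =>
      if seg.isEmpty then total
      else
        let op := lastCh (seg.headD [])
        let nums := seg.map parseNum
        total + (if op = '*' then nums.foldl (· * ·) 1 else nums.foldl (· + ·) 0))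
    0

-- ===== PRECONDITION & SPEC =====
-- Pre_ excludes exactly the inputs where Python A raises: an empty column list (IndexError at
-- col_wise[0][-1], i.e. data empty or containing an empty string) and any non-blank column whose
-- chars-minus-last do not parse as an int (ValueError); column i below is the i-th char of each row
def Pre_part2 (data : List String) : Prop :=
  data ≠ [] ∧ (∀ s ∈ data, s.toList ≠ []) ∧
  (∀ i ∈ List.range (((data.map (fun s => s.toList.length)).min?).getD 0),
    ¬((data.map (fun s => s.toList.getD i ' ')).all (· = ' ') = true) →
    (PySem.Int.ofChars? ((data.map (fun s => s.toList.getD i ' ')).dropLast)).isSome = true)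
instance (data : List String) : Decidable (Pre_part2 data) := by unfold Pre_part2; infer_instance

def pvWitness_part2 : List String := ["1 2", "* +"]

-- When the last column is blank and immediately preceded by a group whose operator is '*', A's final
-- accumulate([], op) reuses that stale '*' and returns B's total + 1; B returns the plain total of the
-- groups, which is the intended value (an empty trailing group contributes nothing).
def D_part2 (data : List String) : Prop :=
  let cols := pyZip (data.map String.toList)
  let seg := (cols.dropLast.reverse.takeWhile (fun c => !(c.all (· = ' ')))).reverse
  cols ≠ [] ∧ (cols.getLastD []).all (· = ' ') = true ∧ seg ≠ [] ∧ lastCh (seg.headD []) = '*'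
instance (data : List String) : Decidable (D_part2 data) := by unfold D_part2; infer_instance

def Spec_part2 (data : List String) (out : Int) : Prop := ¬ D_part2 data → out = part2_alt data
instance (data : List String) (out : Int) : Decidable (Spec_part2 data out) := by
  unfold Spec_part2; infer_instance

def pvDiffWitness_part2 : List String := ["1 ", "* "]
def pvDiffWitnessOut_part2 : Int × Int := (2, 1)

-- ===== CLAIM (what is proved, stated in full; the proofs are below) =====
def Claim_unchanged_part2 : Prop :=
  ∀ (data : List String), Dom_part2 data → Pre_part2 data → Spec_part2 data (part2 data)
def Claim_changed_part2 : Prop :=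
  Dom_part2 (pvDiffWitness_part2) ∧ Pre_part2 (pvDiffWitness_part2) ∧ D_part2 (pvDiffWitness_part2) ∧
  part2 (pvDiffWitness_part2) = pvDiffWitnessOut_part2.1 ∧
  part2_alt (pvDiffWitness_part2) = pvDiffWitnessOut_part2.2 ∧
  pvDiffWitnessOut_part2.1 ≠ pvDiffWitnessOut_part2.2
def Claim_exact_part2 : Prop :=
  ∀ (data : List String), Dom_part2 data → Pre_part2 data → D_part2 data →
    part2 data ≠ part2_alt data


-- ===== LEMMAS AND PROOFS =====
-- an empty grid or a grid with an empty row has no columns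
theorem pyZip_nil_of_guard (data : List String)
    (hg : (data.isEmpty || data.any (fun s => s.toList.isEmpty)) = true) :
    pyZip (data.map String.toList) = [] := by
  cases data with
  | nil => rfl
  | cons s rest =>
    have hany : (s :: rest).any (fun s => s.toList.isEmpty) = true := by
      simpa using hg
    simp only [List.map_cons, pyZip]
    cases hl : s.toList with
    | nil => rfl
    | cons a as =>
      have hany' : ((a :: as) :: rest.map String.toList).any List.isEmpty = true := by
        rcases List.any_eq_true.mp hany with ⟨x, hx, hxe⟩
        rcases List.mem_cons.mp hx with h | h
        · exfalso
          subst h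
          rw [hl] at hxe
          simp at hxe
        · exact List.any_eq_true.mpr ⟨x.toList, List.mem_cons_of_mem _ (List.mem_map_of_mem h),
            hxe⟩
      simp [pyZipAux, hany']

-- proof-side helpers: the common group value, the blank-separated segments, the quirk indicator
def valOp (op : Char) (nums : List Int) : Int :=
  if op = '*' then nums.foldl (· * ·) 1 else nums.foldl (· + ·) 0

def segVal (seg : List (List Char)) : Int :=
  if seg.isEmpty then 0 else valOp (lastCh (seg.headD [])) (seg.map parseNum)

def segsP : List (List Char) → List (List Char) × List (List (List Char))
  | [] => ([], [])
  | c :: rest =>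
    if c.all (· = ' ') then ([], (segsP rest).1 :: (segsP rest).2)
    else (c :: (segsP rest).1, (segsP rest).2)

def refGo : List (List Char) → Char → List Int → Int
  | [], op, group => accumulateA group op
  | col :: rest, op, group =>
    if col.all (· = ' ') then
      accumulateA group op +
        (match rest with
         | [] => accumulateA [] op
         | c2 :: _ => refGo rest (lastCh c2) [])
    else refGo rest op (group ++ [parseNum col])

def extraQ : List (List Char) → Char → Int
  | [], _ => 0
  | col :: rest, op =>
    if col.all (· = ' ') then
      (match rest with
       | [] => (if op = '*' then 1 else 0)
       | c2 :: _ => extraQ rest (lastCh c2))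
    else extraQ rest op

def endSeg (pre : List (List Char)) : List (List Char) :=
  (pre.reverse.takeWhile (fun c => !(c.all (· = ' ')))).reverse

def qOp (pre : List (List Char)) (op : Char) : Char :=
  if pre.all (fun c => !(c.all (· = ' '))) then op
  else if endSeg pre = [] then ' ' else lastCh ((endSeg pre).headD [])

-- small evaluation lemmas
theorem accumulateA_eq_valOp (g : List Int) (op : Char) : accumulateA g op = valOp op g := by
  by_cases h : op = '*' <;> simp [accumulateA, valOp, h]

theorem valOp_nil (op : Char) : valOp op [] = (if op = '*' then 1 else 0) := by
  by_cases h : op = '*' <;> simp [valOp, h]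

theorem blank_lastCh (c : List Char) (h : c.all (· = ' ') = true) : lastCh c = ' ' := by
  unfold lastCh
  rw [PySem.List.pyGet?_neg_one]
  cases hc : c.getLast? with
  | none => rfl
  | some x =>
    have hx : x ∈ c := List.mem_of_getLast? hc
    have := List.all_eq_true.mp h x hx
    simp at this
    simp [this]

-- one-step unfolding lemmas
theorem segsP_blank {c : List Char} (rest : List (List Char)) (hb : c.all (· = ' ') = true) :
    segsP (c :: rest) = ([], (segsP rest).1 :: (segsP rest).2) := by
  simp [segsP, hb]

theorem segsP_nonblank {c : List Char} (rest : List (List Char)) (hb : ¬ c.all (· = ' ') = true) :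
    segsP (c :: rest) = (c :: (segsP rest).1, (segsP rest).2) := by
  simp [segsP, hb]

theorem refGo_blank_nil {c : List Char} (op : Char) (g : List Int)
    (hb : c.all (· = ' ') = true) :
    refGo [c] op g = accumulateA g op + accumulateA [] op := by
  simp [refGo, hb]

theorem refGo_blank_cons {c c2 : List Char} (rest : List (List Char)) (op : Char) (g : List Int)
    (hb : c.all (· = ' ') = true) :
    refGo (c :: c2 :: rest) op g = accumulateA g op + refGo (c2 :: rest) (lastCh c2) [] := by
  simp [refGo, hb]

theorem refGo_nonblank {c : List Char} (rest : List (List Char)) (op : Char) (g : List Int)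
    (hb : ¬ c.all (· = ' ') = true) :
    refGo (c :: rest) op g = refGo rest op (g ++ [parseNum c]) := by
  simp [refGo, hb]

theorem extraQ_blank_nil {c : List Char} (op : Char) (hb : c.all (· = ' ') = true) :
    extraQ [c] op = (if op = '*' then 1 else 0) := by
  simp [extraQ, hb]

theorem extraQ_blank_cons {c c2 : List Char} (rest : List (List Char)) (op : Char)
    (hb : c.all (· = ' ') = true) :
    extraQ (c :: c2 :: rest) op = extraQ (c2 :: rest) (lastCh c2) := by
  simp [extraQ, hb]

theorem extraQ_nonblank {c : List Char} (rest : List (List Char)) (op : Char)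
    (hb : ¬ c.all (· = ' ') = true) :
    extraQ (c :: rest) op = extraQ rest op := by
  simp [extraQ, hb]

theorem part2Go_blank_nil {c : List Char} (op : Char) (g res : List Int)
    (hb : c.all (· = ' ') = true) :
    part2Go [c] op g res =
      ((res ++ [accumulateA g op]) ++ [accumulateA [] op]).foldl (· + ·) 0 := by
  simp [part2Go, hb]

theorem part2Go_blank_cons {c c2 : List Char} (rest : List (List Char)) (op : Char)
    (g res : List Int) (hb : c.all (· = ' ') = true) :
    part2Go (c :: c2 :: rest) op g res =
      part2Go (c2 :: rest) (lastCh c2) [] (res ++ [accumulateA g op]) := by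
  simp [part2Go, hb]

theorem part2Go_nonblank {c : List Char} (rest : List (List Char)) (op : Char)
    (g res : List Int) (hb : ¬ c.all (· = ' ') = true) :
    part2Go (c :: rest) op g res = part2Go rest op (g ++ [parseNum c]) res := by
  rw [part2Go.eq_def]
  simp [hb]

-- A's loop = sum of res + the reference recursion
theorem goA_eq (cols : List (List Char)) : ∀ (op : Char) (group : List Int) (res : List Int),
    part2Go cols op group res = res.foldl (· + ·) 0 + refGo cols op group := by
  induction cols with
  | nil => intro op g res; simp [part2Go, refGo, List.foldl_append]
  | cons c rest ih =>
    intro op g res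
    by_cases hb : c.all (· = ' ') = true
    · cases rest with
      | nil =>
        rw [part2Go_blank_nil op g res hb, refGo_blank_nil op g hb]
        simp [List.foldl_append]
        ring
      | cons c2 rest' =>
        rw [part2Go_blank_cons rest' op g res hb, ih, refGo_blank_cons rest' op g hb]
        simp [List.foldl_append]
        ring
    · rw [part2Go_nonblank rest op g res hb, ih, refGo_nonblank rest op g hb]

-- the reference recursion in terms of segments + quirk
theorem refGo_eq (cols : List (List Char)) : ∀ (op : Char) (group : List Int),
    refGo cols op group =
      valOp op (group ++ (segsP cols).1.map parseNum) +
        ((segsP cols).2.map segVal).sum + extraQ cols op := by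
  induction cols with
  | nil => intro op g; simp [refGo, segsP, extraQ, accumulateA_eq_valOp]
  | cons c rest ih =>
    intro op g
    by_cases hb : c.all (· = ' ') = true
    · rw [segsP_blank rest hb]
      cases rest with
      | nil =>
        rw [refGo_blank_nil op g hb, extraQ_blank_nil op hb]
        simp [segsP, segVal, accumulateA_eq_valOp, valOp_nil]
      | cons c2 rest' =>
        rw [refGo_blank_cons rest' op g hb, extraQ_blank_cons rest' op hb]
        have hseg : segVal (segsP (c2 :: rest')).1 =
            valOp (lastCh c2) ((segsP (c2 :: rest')).1.map parseNum) := by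
          by_cases hb2 : c2.all (· = ' ') = true
          · rw [segsP_blank rest' hb2]
            simp [segVal, valOp_nil, blank_lastCh c2 hb2]
          · rw [segsP_nonblank rest' hb2]
            simp [segVal]
        rw [accumulateA_eq_valOp, ih]
        simp only [List.nil_append]
        rw [← hseg]
        simp
        ring
    · rw [segsP_nonblank rest hb, refGo_nonblank rest op g hb, ih,
        extraQ_nonblank rest op hb]
      simp

-- B's first fold produces the segments of segsP
theorem splitFold_eq (cols : List (List Char)) :
    ∀ (segs : List (List (List Char))) (cur : List (List Char)),
      ((cols.foldl
        (fun (st : List (List (List Char)) × List (List Char)) col =>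
          if col.all (· = ' ') then (st.1 ++ [st.2], []) else (st.1, st.2 ++ [col]))
        (segs, cur)).1 ++
       [(cols.foldl
        (fun (st : List (List (List Char)) × List (List Char)) col =>
          if col.all (· = ' ') then (st.1 ++ [st.2], []) else (st.1, st.2 ++ [col]))
        (segs, cur)).2]) =
      segs ++ (cur ++ (segsP cols).1) :: (segsP cols).2 := by
  induction cols with
  | nil => intro segs cur; simp [segsP]
  | cons c rest ih =>
    intro segs cur
    by_cases hb : c.all (· = ' ') = true
    · rw [segsP_blank rest hb]
      simp only [List.foldl_cons, hb, if_true]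
      rw [ih]
      simp
    · rw [segsP_nonblank rest hb]
      simp only [List.foldl_cons, hb]
      rw [ih]
      simp

-- B's second fold sums segVal over the segments
theorem totalFold_eq (L : List (List (List Char))) : ∀ (t : Int),
    L.foldl
      (fun total seg =>
        if seg.isEmpty then total
        else
          total + (if lastCh (seg.headD []) = '*' then (seg.map parseNum).foldl (· * ·) 1
                   else (seg.map parseNum).foldl (· + ·) 0))
      t = t + (L.map segVal).sum := by
  induction L with
  | nil => intro t; simp
  | cons s L ih =>
    intro t
    by_cases hs : s.isEmpty = true
    · have hs' : s = [] := List.isEmpty_iff.mp hs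
      subst hs'
      rw [List.foldl_cons, ih]
      simp [segVal]
    · rw [List.foldl_cons, ih]
      simp [segVal, hs, valOp]
      ring

theorem firstSeg_eq (cols : List (List Char)) :
    valOp (lastCh (cols.headD [])) ((segsP cols).1.map parseNum) = segVal (segsP cols).1 := by
  cases cols with
  | nil => simp [segsP, segVal, valOp, lastCh, PySem.List.pyGet?]
  | cons c rest =>
    by_cases hb : c.all (· = ' ') = true
    · rw [segsP_blank rest hb]
      simp [segVal, valOp_nil, blank_lastCh c hb]
    · rw [segsP_nonblank rest hb]
      simp [segVal]

theorem takeWhile_append_of_all {α : Type} (p : α → Bool) (l l2 : List α)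
    (h : l.all p = true) : (l ++ l2).takeWhile p = l ++ l2.takeWhile p := by
  induction l with
  | nil => simp
  | cons x xs ih =>
    rw [List.all_cons, Bool.and_eq_true] at h
    simp [h.1, ih h.2]

theorem takeWhile_append_of_not_all {α : Type} (p : α → Bool) (l l2 : List α)
    (h : l.all p = false) : (l ++ l2).takeWhile p = l.takeWhile p := by
  induction l with
  | nil => simp at h
  | cons x xs ih =>
    by_cases hx : p x = true
    · rw [List.all_cons, hx, Bool.true_and] at h
      simp [hx, ih h]
    · simp [hx]

theorem endSeg_all (pre : List (List Char)) (h : pre.all (fun c => !(c.all (· = ' '))) = true) :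
    endSeg pre = pre := by
  unfold endSeg
  rw [List.takeWhile_eq_self_iff.mpr]
  · simp
  · intro a ha
    exact List.all_eq_true.mp h a (List.mem_reverse.mp ha)

theorem endSeg_cons (c : List Char) (pre : List (List Char)) :
    endSeg (c :: pre) =
      if pre.all (fun c => !(c.all (· = ' '))) then
        (if c.all (· = ' ') then pre else c :: pre)
      else endSeg pre := by
  unfold endSeg
  rw [show (c :: pre).reverse = pre.reverse ++ [c] by simp]
  by_cases ha : pre.all (fun c => !(c.all (· = ' '))) = true
  · have ha' : pre.reverse.all (fun c => !(c.all (· = ' '))) = true := by simpa using ha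
    rw [takeWhile_append_of_all _ _ _ ha', if_pos ha]
    by_cases hb : c.all (· = ' ') = true
    · simp [hb]
    · simp [hb]
  · have ha' : pre.reverse.all (fun c => !(c.all (· = ' '))) = false := by
      rw [List.all_reverse]
      exact Bool.eq_false_iff.mpr ha
    rw [takeWhile_append_of_not_all _ _ _ ha', if_neg ha]

-- op threading: qOp absorbs a leading column
theorem qOp_cons_blank (c c2 : List Char) (rest : List (List Char)) (op : Char)
    (hb : c.all (· = ' ') = true) :
    qOp (c :: c2 :: rest) op = qOp (c2 :: rest) (lastCh c2) := by
  have hnc : ((c :: c2 :: rest).all (fun c => !(c.all (· = ' ')))) = false := by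
    simp [List.all_cons, hb]
  by_cases ha : (c2 :: rest).all (fun c => !(c.all (· = ' '))) = true
  · have hes : endSeg (c :: c2 :: rest) = c2 :: rest := by
      rw [endSeg_cons, if_pos ha, if_pos hb]
    simp [qOp, hnc, hes, ha]
  · have ha' : ((c2 :: rest).all (fun c => !(c.all (· = ' ')))) = false := Bool.eq_false_iff.mpr ha
    have hes : endSeg (c :: c2 :: rest) = endSeg (c2 :: rest) := by
      rw [endSeg_cons, if_neg ha]
    simp [qOp, hnc, hes, ha']

theorem qOp_cons_nonblank (c : List Char) (pre : List (List Char)) (op : Char)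
    (hb : ¬ c.all (· = ' ') = true) :
    qOp (c :: pre) op = qOp pre op := by
  have hqc : (!(c.all (· = ' '))) = true := by
    rw [Bool.eq_false_iff.mpr hb]; rfl
  by_cases ha : pre.all (fun c => !(c.all (· = ' '))) = true
  · have hall : ((c :: pre).all (fun c => !(c.all (· = ' ')))) = true := by
      rw [List.all_cons, ha, hqc]; rfl
    simp [qOp, hall, ha]
  · have ha' : (pre.all (fun c => !(c.all (· = ' ')))) = false := Bool.eq_false_iff.mpr ha
    have hnc : ((c :: pre).all (fun c => !(c.all (· = ' ')))) = false := by
      rw [List.all_cons, ha', Bool.and_false]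
    have hes : endSeg (c :: pre) = endSeg pre := by
      rw [endSeg_cons, if_neg ha]
    simp [qOp, hnc, hes, ha']

-- the quirk indicator in closed form
theorem extraQ_eq (pre : List (List Char)) : ∀ (t : List Char) (op : Char),
    extraQ (pre ++ [t]) op =
      if (t.all (· = ' ') = true ∧ qOp pre op = '*') then 1 else 0 := by
  induction pre with
  | nil =>
    intro t op
    have hq : qOp [] op = op := by simp [qOp]
    rw [List.nil_append, hq]
    by_cases hb : t.all (· = ' ') = true
    · rw [extraQ_blank_nil op hb]
      simp [hb]
    · simp only [extraQ, hb]
      simp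
  | cons c pre' ih =>
    intro t op
    by_cases hb : c.all (· = ' ') = true
    · cases pre' with
      | nil =>
        have hstep : extraQ ([c] ++ [t]) op = extraQ [t] (lastCh t) :=
          extraQ_blank_cons [] op hb
        have ih' := ih t (lastCh t)
        rw [List.nil_append] at ih'
        rw [hstep, ih']
        have h1 : qOp [] (lastCh t) = lastCh t := by simp [qOp]
        have h2 : qOp [c] op = ' ' := by
          have hnc : (([c] : List (List Char)).all (fun c => !(c.all (· = ' ')))) = false := by
            simp [List.all_cons, hb]
          have hes : endSeg [c] = [] := by
            have : (!(c.all (· = ' '))) = false := by rw [hb]; rfl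
            simp [endSeg, this]
          simp [qOp, hnc, hes]
        rw [h1, h2]
        by_cases ht : t.all (· = ' ') = true
        · simp [ht, blank_lastCh t ht]
        · simp [ht]
      | cons c2 rest =>
        have hstep : extraQ ((c :: c2 :: rest) ++ [t]) op =
            extraQ ((c2 :: rest) ++ [t]) (lastCh c2) := extraQ_blank_cons (rest ++ [t]) op hb
        rw [hstep, ih, qOp_cons_blank c c2 rest op hb]
    · have hstep : extraQ ((c :: pre') ++ [t]) op = extraQ (pre' ++ [t]) op :=
        extraQ_nonblank (pre' ++ [t]) op hb
      rw [hstep, ih, qOp_cons_nonblank c pre' op hb]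

-- assembling both ports
theorem part2_unfold (data : List String) :
    part2 data =
      segVal (segsP (pyZip (data.map String.toList))).1 +
        ((segsP (pyZip (data.map String.toList))).2.map segVal).sum +
        extraQ (pyZip (data.map String.toList)) (lastCh ((pyZip (data.map String.toList)).headD [])) := by
  show part2Go _ _ [] [] = _
  rw [goA_eq, refGo_eq]
  simp only [List.foldl_nil, List.nil_append, zero_add]
  rw [firstSeg_eq]

theorem part2_alt_unfold (data : List String)
    (hg : ¬ (data.isEmpty || data.any (fun s => s.toList.isEmpty)) = true) :
    part2_alt data =
      segVal (segsP (pyZip (data.map String.toList))).1 +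
        ((segsP (pyZip (data.map String.toList))).2.map segVal).sum := by
  unfold part2_alt
  rw [if_neg hg]
  show (_ ++ [_]).foldl _ 0 = _
  rw [splitFold_eq (pyZip (data.map String.toList)) [] []]
  rw [totalFold_eq]
  simp

-- the closed-form condition of D_part2, on an explicit split cols = pre ++ [t]
theorem cond_iff (pre : List (List Char)) (t : List Char) :
    (t.all (· = ' ') = true ∧ qOp pre (lastCh ((pre ++ [t]).headD [])) = '*') ↔
      (t.all (· = ' ') = true ∧ endSeg pre ≠ [] ∧ lastCh ((endSeg pre).headD []) = '*') := by
  constructor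
  · rintro ⟨ht, hq⟩
    refine ⟨ht, ?_⟩
    by_cases ha : pre.all (fun c => !(c.all (· = ' '))) = true
    · have hseg : endSeg pre = pre := endSeg_all pre ha
      cases pre with
      | nil =>
        exfalso
        rw [qOp] at hq
        simp only [List.all_nil, if_true, List.nil_append, List.headD_cons] at hq
        rw [blank_lastCh t ht] at hq
        exact absurd hq (by decide)
      | cons c pre' =>
        rw [qOp, if_pos ha] at hq
        rw [hseg]
        exact ⟨by simp, by simpa using hq⟩
    · rw [qOp, if_neg ha] at hq
      by_cases hes : endSeg pre = []
      · rw [if_pos hes] at hq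
        exact absurd hq (by decide)
      · rw [if_neg hes] at hq
        exact ⟨hes, hq⟩
  · rintro ⟨ht, hne, hlc⟩
    refine ⟨ht, ?_⟩
    by_cases ha : pre.all (fun c => !(c.all (· = ' '))) = true
    · have hseg : endSeg pre = pre := endSeg_all pre ha
      rw [qOp, if_pos ha]
      cases pre with
      | nil => exact absurd hseg.symm hne
      | cons c pre' =>
        rw [hseg] at hlc
        simpa using hlc
    · rw [qOp, if_neg ha, if_neg hne]
      exact hlc

theorem extraQ_eq_D (data : List String) :
    extraQ (pyZip (data.map String.toList))
        (lastCh ((pyZip (data.map String.toList)).headD [])) =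
      (if D_part2 data then 1 else 0) := by
  by_cases hc : pyZip (data.map String.toList) = []
  · have hd : ¬ D_part2 data := fun hd => hd.1 hc
    rw [hc, if_neg hd]
    rfl
  · obtain ⟨pre, t, hsplit⟩ : ∃ pre t, pyZip (data.map String.toList) = pre ++ [t] := by
      rcases List.eq_nil_or_concat (pyZip (data.map String.toList)) with h | ⟨pre, t, h⟩
      · exact absurd h hc
      · exact ⟨pre, t, by simpa using h⟩
    have hD : D_part2 data ↔
        (t.all (· = ' ') = true ∧ endSeg pre ≠ [] ∧ lastCh ((endSeg pre).headD []) = '*') := by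
      simp only [D_part2]
      rw [hsplit]
      have h1 : ((pre ++ [t] : List (List Char)).dropLast) = pre := by
        simp
      have h2 : ((pre ++ [t] : List (List Char)).getLastD []) = t := by
        simp [List.getLastD_eq_getLast?]
      rw [h1, h2]
      have h3 : ((pre.reverse.takeWhile (fun c => !(c.all (· = ' ')))).reverse) = endSeg pre :=
        rfl
      rw [h3]
      constructor
      · rintro ⟨-, ht, hne, hlc⟩; exact ⟨ht, hne, hlc⟩
      · rintro ⟨ht, hne, hlc⟩; exact ⟨by simp, ht, hne, hlc⟩
    rw [hsplit, extraQ_eq]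
    by_cases hcond :
        (t.all (· = ' ') = true ∧ qOp pre (lastCh ((pre ++ [t]).headD [])) = '*')
    · rw [if_pos hcond, if_pos (hD.mpr ((cond_iff pre t).mp hcond))]
    · rw [if_neg hcond, if_neg (fun hd => hcond ((cond_iff pre t).mpr (hD.mp hd)))]

theorem part2_main (data : List String) :
    part2 data = part2_alt data + (if D_part2 data then 1 else 0) := by
  by_cases hg : (data.isEmpty || data.any (fun s => s.toList.isEmpty)) = true
  · have hcols : pyZip (data.map String.toList) = [] := pyZip_nil_of_guard data hg
    have hd : ¬ D_part2 data := fun hd => hd.1 hcols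
    have halt : part2_alt data = 0 := by
      unfold part2_alt
      rw [if_pos hg]
    rw [halt, if_neg hd]
    show part2Go _ _ [] [] = 0 + 0
    rw [hcols]
    simp [part2Go, accumulateA, lastCh, PySem.List.pyGet?]
  · rw [part2_unfold, part2_alt_unfold data hg, extraQ_eq_D]

-- ===== VERDICT (by name: the statement is the Claim_ definition above) =====
theorem part2_spec : Claim_unchanged_part2 := by
  intro data _ _ hnd
  have h := part2_main data
  simp [if_neg hnd] at h
  exact h

theorem part2_changed : Claim_changed_part2 := by
  unfold Claim_changed_part2; decide

theorem part2_tight : Claim_exact_part2 := by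
  intro data _ _ hd
  have h := part2_main data
  simp [if_pos hd] at h
  omega
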